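-- pv_equiv track=rewrite | github.com/magnofilipe/go8-replication-tool | ACID/diff_parser.py | getConfigChangeCnt
-- ===== SOURCE A (Python) =====
-- def filterConfig(oldValue):
--     oldValue = oldValue.replace(",","")
--     oldValue = oldValue.replace("'","")
--     oldValue = oldValue.replace(";","")
--     val_     = oldValue.replace(">","")
--
--     return val_
--
-- def getConfigChangeCnt(start_dict, end_dict):
--     tracker = 0
--     track_list = []
--     val_track_list = []
--     for k_, v_ in start_dict.items():
--         if (k_ in end_dict ) and (k_ not in track_list) and (v_ not in val_track_list) and (len(v_) > 1):
--             oldValue     = end_dict[k_]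
--             newValue     = v_
--             # need more pre processign ugh
--             oldValue = filterConfig(oldValue)
--             newValue = filterConfig(newValue)
--             if newValue != oldValue:
--                 # print k_
--                 # print oldValue, newValue
--                 tracker = tracker + 1
--         track_list.append(k_)
--         val_track_list.append(v_)
--     # print '>'*5
--     return tracker
-- ===== SOURCE B (Python) =====
-- def filterConfig(oldValue):
--     oldValue = oldValue.replace(",","")
--     oldValue = oldValue.replace("'","")
--     oldValue = oldValue.replace(";","")
--     val_     = oldValue.replace(">","")
--
--     return val_
--
-- def getConfigChangeCnt(start_dict, end_dict):
--     # Shrinking worklist: handle the first pending entry, then drop every later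
--     # entry that carries the same value (the first occurrence wins), and repeat.
--     items = list(start_dict.items())
--     cnt = 0
--     while items:
--         k, v = items[0]
--         if k in end_dict and len(v) > 1 and filterConfig(end_dict[k]) != filterConfig(v):
--             cnt += 1
--         items = [(k2, v2) for k2, v2 in items[1:] if v2 != v]
--     return cnt
-- ===== Notes on version B (the rewrite author's own statement) =====
-- stated objective: alternative
-- what changed: Replaces A's single scan that accumulates three parallel seen-lists by a shrinking-worklist loop: process the first pending entry, then delete from the remaining worklist every pair carrying the same value, so no seen-set or tracking structure exists at all.
import Mathlib
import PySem

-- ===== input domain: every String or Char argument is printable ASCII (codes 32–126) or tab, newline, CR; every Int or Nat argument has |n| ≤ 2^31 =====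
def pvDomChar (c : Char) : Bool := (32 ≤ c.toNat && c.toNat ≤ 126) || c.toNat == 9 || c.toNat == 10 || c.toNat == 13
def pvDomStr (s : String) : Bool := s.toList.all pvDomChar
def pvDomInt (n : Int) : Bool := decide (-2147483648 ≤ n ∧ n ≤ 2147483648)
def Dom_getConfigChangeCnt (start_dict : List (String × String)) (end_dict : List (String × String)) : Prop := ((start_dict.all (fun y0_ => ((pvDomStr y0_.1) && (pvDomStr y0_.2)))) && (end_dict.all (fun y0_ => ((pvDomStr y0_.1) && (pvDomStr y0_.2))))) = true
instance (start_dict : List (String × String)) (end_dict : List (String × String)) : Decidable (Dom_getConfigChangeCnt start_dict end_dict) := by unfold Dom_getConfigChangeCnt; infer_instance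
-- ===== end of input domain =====

-- B replaces A's single scan with three parallel seen-lists by a shrinking-worklist loop that
-- deletes same-value duplicates from the remaining work after handling each head (alternative).


-- ===== PORT A =====
-- filterConfig, shared helper of both Python versions (B copies it verbatim)
def pvFilterConfig (oldValue : String) : String :=
  let oldValue := PySem.Str.replace oldValue "," ""
  let oldValue := PySem.Str.replace oldValue "'" ""
  let oldValue := PySem.Str.replace oldValue ";" ""
  let val_ := PySem.Str.replace oldValue ">" ""
  val_

-- Python dict lookup end_dict[k] (guarded by `k in end_dict`, so the default is never used)
def pvEndGet (end_dict : List (String × String)) (k : String) : String :=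
  ((end_dict.find? (fun p => p.1 == k)).map Prod.snd).getD ""

-- the body of A's for-loop; state = (tracker, track_list, val_track_list)
def pvStepA (end_dict : List (String × String)) (st : Int × List String × List String)
    (kv : String × String) : Int × List String × List String :=
  let tracker := st.1
  let track_list := st.2.1
  let val_track_list := st.2.2
  let k_ := kv.1
  let v_ := kv.2
  let tracker :=
    if (end_dict.any (fun p => p.1 == k_)) && !(track_list.contains k_)
        && !(val_track_list.contains v_) && decide (1 < PySem.Str.len v_) then
      let oldValue := pvEndGet end_dict k_
      let newValue := v_
      let oldValue := pvFilterConfig oldValue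
      let newValue := pvFilterConfig newValue
      if newValue != oldValue then tracker + 1 else tracker
    else tracker
  (tracker, track_list ++ [k_], val_track_list ++ [v_])

def getConfigChangeCnt (start_dict : List (String × String)) (end_dict : List (String × String)) : Int :=
  (start_dict.foldl (pvStepA end_dict) (0, [], [])).1

-- ===== PORT B =====
-- the while loop of Source B: state = (cnt, items); the worklist strictly shrinks each iteration
def pvGoB (end_dict : List (String × String)) (cnt : Int) :
    List (String × String) → Int
  | [] => cnt
  | (k, v) :: rest =>
      let cnt :=
        if (end_dict.any (fun p => p.1 == k)) && decide (1 < PySem.Str.len v)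
            && (pvFilterConfig (pvEndGet end_dict k) != pvFilterConfig v) then cnt + 1 else cnt
      pvGoB end_dict cnt (rest.filter (fun p => p.2 ≠ v))
termination_by items => items.length
decreasing_by
  simp only [List.length_unattach]
  exact Nat.lt_succ_of_le ((List.length_filter_le _ _).trans (le_of_eq List.length_attach))

def getConfigChangeCnt_alt (start_dict : List (String × String)) (end_dict : List (String × String)) : Int :=
  pvGoB end_dict 0 start_dict

-- ===== PRECONDITION & SPEC =====
-- Pre_ excludes association lists whose start_dict has duplicate keys: a Python dict cannot contain
-- duplicate keys, so such lists represent no Python input (A's key-dedup guard is vacuous on real dicts).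
def Pre_getConfigChangeCnt (start_dict : List (String × String)) (end_dict : List (String × String)) : Prop :=
  (start_dict.map Prod.fst).Nodup
instance (start_dict : List (String × String)) (end_dict : List (String × String)) : Decidable (Pre_getConfigChangeCnt start_dict end_dict) := by unfold Pre_getConfigChangeCnt; infer_instance

def pvWitness_getConfigChangeCnt : (List (String × String)) × (List (String × String)) :=
  ([("a", "xx"), ("b", "y,y")], [("a", "x,x"), ("b", "yy")])

def Spec_getConfigChangeCnt (start_dict : List (String × String)) (end_dict : List (String × String)) (out : Int) : Prop := out = getConfigChangeCnt_alt start_dict end_dict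
instance (start_dict : List (String × String)) (end_dict : List (String × String)) (out : Int) : Decidable (Spec_getConfigChangeCnt start_dict end_dict out) := by unfold Spec_getConfigChangeCnt; infer_instance

-- ===== CLAIM (what is proved, stated in full; the proofs are below) =====
def Claim_equal_getConfigChangeCnt : Prop := ∀ (start_dict : List (String × String)) (end_dict : List (String × String)), Dom_getConfigChangeCnt start_dict end_dict → Pre_getConfigChangeCnt start_dict end_dict → Spec_getConfigChangeCnt start_dict end_dict (getConfigChangeCnt start_dict end_dict)

-- ===== LEMMAS AND PROOFS =====

-- Loop invariant: A's fold over l with accumulated seen-lists equals B's worklist recursion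
-- started from the pending entries of l whose values are not yet seen.
lemma pv_loop (end_dict : List (String × String)) :
    ∀ (l : List (String × String)) (t : Int) (track vt : List String),
      (l.map Prod.fst).Nodup →
      (∀ p ∈ l, track.contains p.1 = false) →
      (l.foldl (pvStepA end_dict) (t, track, vt)).1
        = pvGoB end_dict t (l.filter (fun p => !vt.contains p.2)) := by
  intro l
  induction l with
  | nil => intro t track vt _ _; rw [List.filter_nil, List.foldl_nil, pvGoB]
  | cons kv rest ih =>
    intro t track vt hnd h2
    obtain ⟨k, v⟩ := kv
    have hkt : track.contains k = false := h2 (k, v) (List.mem_cons_self ..)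
    have hnd' : (rest.map Prod.fst).Nodup := (List.nodup_cons.mp hnd).2
    have hknotin : k ∉ rest.map Prod.fst := (List.nodup_cons.mp hnd).1
    have h2' : ∀ p ∈ rest, (track ++ [k]).contains p.1 = false := by
      intro p hp
      have hne : p.1 ≠ k := by
        intro hpk; exact hknotin (hpk ▸ List.mem_map_of_mem hp)
      have hpt : p.1 ∉ track := by simpa using h2 p (List.mem_cons_of_mem _ hp)
      simp [hne, hpt]
    by_cases hc : vt.contains v = true
    · -- value already seen: A skips the count; B's worklist never held this pair
      simp only [List.foldl_cons, pvStepA, hkt, hc]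
      simp only [Bool.not_true, Bool.and_false, Bool.false_and, Bool.and_true,
        Bool.not_false, Bool.false_eq_true, if_false]
      rw [ih t (track ++ [k]) (vt ++ [v]) hnd' h2']
      congr 1
      rw [List.filter_cons]
      simp only [hc, Bool.not_true, Bool.false_eq_true, if_false]
      apply List.filter_congr
      intro p _
      by_cases hpv : p.2 = v
      · have hvmem : v ∈ vt := by simpa using hc
        simp [hpv, hvmem]
      · simp [hpv]
    · -- fresh value: the pair heads B's worklist; A's guard matches B's, and B's
      -- same-value deletion from the rest matches A's extended seen-list
      have hc' : vt.contains v = false := by simpa using hc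
      rw [List.foldl_cons]
      have hst : pvStepA end_dict (t, track, vt) (k, v)
          = ((pvStepA end_dict (t, track, vt) (k, v)).1, track ++ [k], vt ++ [v]) := rfl
      rw [hst, ih _ (track ++ [k]) (vt ++ [v]) hnd' h2']
      have hfilter : rest.filter (fun p => !(vt ++ [v]).contains p.2)
          = (rest.filter (fun p => !vt.contains p.2)).filter (fun p => p.2 ≠ v) := by
        rw [List.filter_filter]
        apply List.filter_congr
        intro p _
        by_cases hpv : p.2 = v
        · simp [hpv]
        · simp [hpv]
      have hhead : ((k, v) :: rest).filter (fun p => !vt.contains p.2)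
          = (k, v) :: rest.filter (fun p => !vt.contains p.2) := by
        have hvnotin : v ∉ vt := by simpa using hc'
        rw [List.filter_cons]; simp [hvnotin]
      rw [hhead, hfilter]
      -- unfold one step of pvGoB and match the counted increments
      show _ = pvGoB end_dict t ((k, v) :: rest.filter (fun p => !vt.contains p.2))
      rw [pvGoB]
      congr 1
      simp only [pvStepA, hkt, hc']
      by_cases heq : pvFilterConfig (pvEndGet end_dict k) = pvFilterConfig v
      · simp [heq]
      · cases h1 : end_dict.any (fun p => p.1 == k) <;>
          cases hl : decide (1 < PySem.Str.len v) <;>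
            simp [heq, Ne.symm heq]

-- ===== VERDICT (by name: the statement is the Claim_ definition above) =====
theorem getConfigChangeCnt_spec : Claim_equal_getConfigChangeCnt := by
  intro start_dict end_dict _ hpre
  unfold Spec_getConfigChangeCnt getConfigChangeCnt getConfigChangeCnt_alt
  rw [pv_loop end_dict start_dict 0 [] [] hpre (by intro p _; rfl)]
  congr 1
  simp
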